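-- pv_equiv track=rewrite | github.com/alhambraGod/claw_omniscientist | channels/dingtalk_adapter.py | _normalize_markdown
-- ===== SOURCE A (Python) =====
-- def _normalize_markdown(text: str) -> str:
--     """将标准 Markdown 标题转换为钉钉兼容格式。
--
--     钉钉 Markdown 仅可靠支持 # 和 ##，3-6 级标题渲染不稳定，
--     统一转换为加粗文本以确保显示正常。
--     """
--     lines = text.split("\n")
--     out = []
--     for line in lines:
--         stripped = line.lstrip()
--         if stripped.startswith("#"):
--             for level in range(6, 0, -1):
--                 prefix = "#" * level + " "
--                 if stripped.startswith(prefix):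
--                     title_text = stripped[level + 1:].strip()
--                     if level <= 2:
--                         # 1-2 级保留原生标题语法
--                         out.append(f"{'#' * level} {title_text}")
--                     else:
--                         # 3-6 级转为加粗
--                         out.append(f"**{title_text}**")
--                     break
--             else:
--                 out.append(line)
--         else:
--             out.append(line)
--     return "\n".join(out)
-- ===== SOURCE B (Python) =====
-- def _normalize_markdown(text: str) -> str:
--     """Single streaming pass over the characters with explicit cursors:
--     finds each line boundary itself and rewrites heading lines in place,
--     instead of split('\n') / per-line string-method tests / join."""
--     res = []
--     i, n = 0, len(text)
--     while True:
--         # scan to the end of the current line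
--         j = i
--         while j < n and text[j] != "\n":
--             j += 1
--         # skip leading whitespace of the line
--         p = i
--         while p < j and text[p].isspace():
--             p += 1
--         # count the run of '#'
--         k = p
--         while k < j and text[k] == "#":
--             k += 1
--         lvl = k - p
--         if 1 <= lvl <= 6 and k < j and text[k] == " ":
--             # strip the title text[k+1:j] in place
--             a, b = k + 1, j
--             while a < b and text[a].isspace():
--                 a += 1
--             while b > a and text[b - 1].isspace():
--                 b -= 1
--             title = text[a:b]
--             res.append("#" * lvl + " " + title if lvl <= 2 else "**" + title + "**")
--         else:
--             res.append(text[i:j])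
--         if j == n:
--             break
--         res.append("\n")
--         i = j + 1
--     return "".join(res)
-- ===== Notes on version B (the rewrite author's own statement) =====
-- stated objective: alternative
-- what changed: B is a single streaming scanner over the characters with explicit cursors: it locates each line boundary itself and rewrites a heading in place (measuring the hash run and stripping the title with cursor loops), instead of A's split-into-lines / per-line lstrip+startswith with an inner six-candidate prefix loop / join pipeline.
import Mathlib
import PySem

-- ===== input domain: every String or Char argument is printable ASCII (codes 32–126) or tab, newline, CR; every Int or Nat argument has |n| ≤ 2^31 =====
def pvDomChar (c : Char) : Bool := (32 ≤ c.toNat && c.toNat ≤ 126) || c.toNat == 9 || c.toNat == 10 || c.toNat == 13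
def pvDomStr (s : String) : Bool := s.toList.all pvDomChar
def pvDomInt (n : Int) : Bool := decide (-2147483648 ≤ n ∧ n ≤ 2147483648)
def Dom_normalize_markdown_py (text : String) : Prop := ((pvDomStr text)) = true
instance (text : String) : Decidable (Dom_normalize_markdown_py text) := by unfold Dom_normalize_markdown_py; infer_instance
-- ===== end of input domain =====

-- B replaces A's split-into-lines / per-line lstrip-startswith (with an inner six-candidate prefix
-- loop) / join pipeline by a single streaming scanner with explicit cursors; objective: alternative.

-- ===== PORT A =====
-- inner 'for level in range(6, 0, -1): … else: out.append(line)' — the for-else loop,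
-- recursing over the literal level list [6,5,4,3,2,1] (= range(6,0,-1))
def pvLoopA (stripped line : List Char) : List Nat → List Char
  | [] => line
  | level :: rest =>
    if PySem.Chars.startswith stripped (List.replicate level '#' ++ [' ']) then
      -- title_text = stripped[level+1:].strip()
      let title := PySem.Chars.strip (stripped.drop (level + 1))
      if level ≤ 2 then List.replicate level '#' ++ [' '] ++ title
      else ['*', '*'] ++ title ++ ['*', '*']
    else pvLoopA stripped line rest

def pvLineA (line : List Char) : List Char :=
  let stripped := PySem.Chars.lstrip line
  if PySem.Chars.startswith stripped ['#'] then
    pvLoopA stripped line [6, 5, 4, 3, 2, 1]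
  else line

def normalize_markdown_py (text : String) : String :=
  String.ofList (PySem.Chars.join ['\n']
    ((PySem.Chars.splitOn text.toList ['\n']).foldl (fun acc line => acc ++ [pvLineA line]) []))

-- ===== PORT B =====
-- the body of B's while-iteration once the current line (i..j) is delimited: the
-- whitespace-skip cursor loop, the '#'-run cursor loop, and the two strip cursor loops
def pvEmitB (line : List Char) : List Char :=
  let p := line.dropWhile PySem.Chars.isspace      -- 'while p < j and text[p].isspace(): p += 1'
  let q := p.dropWhile (· == '#')                 -- 'while k < j and text[k] == "#": k += 1'
  let lvl := p.length - q.length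
  if 1 ≤ lvl ∧ lvl ≤ 6 ∧ q[0]? = some ' ' then    -- '1 <= lvl <= 6 and k < j and text[k] == " "'
    -- the two cursor loops stripping text[k+1:j] from the left and from the right
    let title := (((q.drop 1).dropWhile PySem.Chars.isspace).reverse.dropWhile PySem.Chars.isspace).reverse
    if lvl ≤ 2 then List.replicate lvl '#' ++ ' ' :: title
    else '*' :: '*' :: title ++ ['*', '*']
  else line

-- B's outer 'while True': delimit the line at the next '\n', emit its piece, emit '\n'
-- and continue unless the end of the text was reached
def pvGoB (cs : List Char) : List Char :=
  let line := cs.takeWhile (· != '\n')            -- 'while j < n and text[j] != "\n": j += 1'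
  match h : cs.dropWhile (· != '\n') with
  | [] => pvEmitB line                            -- 'if j == n: break'
  | _ :: tail => pvEmitB line ++ '\n' :: pvGoB tail
termination_by cs.length
decreasing_by
  have hle := List.length_dropWhile_le (p := fun c => c != '\n') (l := cs)
  rw [h] at hle; simp at hle; omega

def normalize_markdown_py_alt (text : String) : String :=
  String.ofList (pvGoB text.toList)

-- ===== PRECONDITION & SPEC =====
def Spec_normalize_markdown_py (text : String) (out : String) : Prop := out = normalize_markdown_py_alt text
instance (text : String) (out : String) : Decidable (Spec_normalize_markdown_py text out) := by unfold Spec_normalize_markdown_py; infer_instance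

-- ===== CLAIM (what is proved, stated in full; the proofs are below) =====
def Claim_equal_normalize_markdown_py : Prop := ∀ (text : String), Dom_normalize_markdown_py text → Spec_normalize_markdown_py text (normalize_markdown_py text)

-- ===== LEMMAS AND PROOFS =====

-- the leading-'#' run length B measures
def pvRun (s : List Char) : Nat := s.length - (s.dropWhile (· == '#')).length

theorem pvRun_eq_takeWhile (s : List Char) :
    pvRun s = (s.takeWhile (· == '#')).length := by
  have h := congrArg List.length (List.takeWhile_append_dropWhile (p := (· == '#')) (l := s))
  simp only [List.length_append] at h
  unfold pvRun; omega

theorem pvDropWhile_eq_drop_run (s : List Char) :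
    s.dropWhile (· == '#') = s.drop (pvRun s) := by
  rw [pvRun_eq_takeWhile]
  induction s with
  | nil => rfl
  | cons c t ih =>
    by_cases hc : (c == '#') = true
    · simp [List.dropWhile, List.takeWhile, hc, ih]
    · simp [List.dropWhile, List.takeWhile, hc]

-- A's prefix test characterised by B's run length
theorem pvStartswith_iff (k : Nat) (s : List Char) :
    PySem.Chars.startswith s (List.replicate k '#' ++ [' ']) = true ↔
      (k = pvRun s ∧ s[k]? = some ' ') := by
  simp only [pvRun_eq_takeWhile]
  induction k generalizing s with
  | zero =>
    cases s with
    | nil => simp [PySem.Chars.startswith_iff]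
    | cons c t =>
      simp only [List.replicate_zero, List.nil_append, PySem.Chars.startswith_iff,
        List.takeWhile, List.getElem?_cons_zero]
      constructor
      · rintro h
        rcases List.cons_prefix_cons.mp h with ⟨rfl, -⟩
        simp
      · rintro ⟨h1, h2⟩
        simp_all [List.cons_prefix_cons]
  | succ k ih =>
    cases s with
    | nil => simp [PySem.Chars.startswith_iff]
    | cons c t =>
      simp only [List.replicate_succ, List.cons_append, PySem.Chars.startswith_iff,
        List.cons_prefix_cons, List.takeWhile, List.getElem?_cons_succ]
      by_cases hc : c = '#'
      · subst hc
        simp only [beq_self_eq_true, List.length_cons]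
        rw [← PySem.Chars.startswith_iff, ih]
        constructor
        · rintro ⟨-, h1, h2⟩; exact ⟨by omega, h2⟩
        · rintro ⟨h1, h2⟩; exact ⟨trivial, by omega, h2⟩
      · have hb : (c == '#') = false := beq_eq_false_iff_ne.mpr hc
        simp [hb, Ne.symm hc]

-- first char '#' iff the run is nonempty
theorem pvRun_pos_iff (s : List Char) :
    PySem.Chars.startswith s ['#'] = true ↔ 1 ≤ pvRun s := by
  rw [pvRun_eq_takeWhile, PySem.Chars.startswith_iff]
  cases s with
  | nil => simp
  | cons c t =>
    by_cases hc : c = '#'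
    · simp [List.cons_prefix_cons, List.takeWhile, hc]
    · have hb : (c == '#') = false := beq_eq_false_iff_ne.mpr hc
      simp [List.cons_prefix_cons, List.takeWhile, hb, Ne.symm hc]

-- the six-iteration for-else loop, evaluated when exactly level = pvRun s matches
theorem pvLoop_eval (s line : List Char) (hn : 1 ≤ pvRun s) (h6 : pvRun s ≤ 6)
    (hsp : s[pvRun s]? = some ' ') :
    pvLoopA s line [6, 5, 4, 3, 2, 1] =
      (if pvRun s ≤ 2 then
        List.replicate (pvRun s) '#' ++ [' '] ++ PySem.Chars.strip (s.drop (pvRun s + 1))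
      else ['*', '*'] ++ PySem.Chars.strip (s.drop (pvRun s + 1)) ++ ['*', '*']) := by
  have hp : PySem.Chars.startswith s (List.replicate (pvRun s) '#' ++ [' ']) = true :=
    (pvStartswith_iff _ s).mpr ⟨rfl, hsp⟩
  have hk : ∀ k, k ≠ pvRun s →
      ¬ (PySem.Chars.startswith s (List.replicate k '#' ++ [' ']) = true) :=
    fun k hne h => hne ((pvStartswith_iff k s).mp h).1
  generalize hg : pvRun s = n at hn h6 hsp hp hk ⊢
  interval_cases n
  · simp only [pvLoopA]
    rw [if_neg (hk 6 (by omega)), if_neg (hk 5 (by omega)), if_neg (hk 4 (by omega)),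
        if_neg (hk 3 (by omega)), if_neg (hk 2 (by omega)), if_pos hp]
  · simp only [pvLoopA]
    rw [if_neg (hk 6 (by omega)), if_neg (hk 5 (by omega)), if_neg (hk 4 (by omega)),
        if_neg (hk 3 (by omega)), if_pos hp]
  · simp only [pvLoopA]
    rw [if_neg (hk 6 (by omega)), if_neg (hk 5 (by omega)), if_neg (hk 4 (by omega)),
        if_pos hp]
  · simp only [pvLoopA]
    rw [if_neg (hk 6 (by omega)), if_neg (hk 5 (by omega)), if_pos hp]
  · simp only [pvLoopA]
    rw [if_neg (hk 6 (by omega)), if_pos hp]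
  · simp only [pvLoopA]
    rw [if_pos hp]

-- the for-else loop falls through to the original line when no prefix matches
theorem pvLoop_none (s line : List Char)
    (h : ∀ k, 1 ≤ k → k ≤ 6 →
      ¬ (PySem.Chars.startswith s (List.replicate k '#' ++ [' ']) = true)) :
    pvLoopA s line [6, 5, 4, 3, 2, 1] = line := by
  simp only [pvLoopA]
  rw [if_neg (h 6 (by omega) (by omega)), if_neg (h 5 (by omega) (by omega)),
      if_neg (h 4 (by omega) (by omega)), if_neg (h 3 (by omega) (by omega)),
      if_neg (h 2 (by omega) (by omega)), if_neg (h 1 (by omega) (by omega))]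

-- A's per-line transform equals B's per-line emission
theorem pvLine_eq (line : List Char) : pvLineA line = pvEmitB line := by
  unfold pvLineA pvEmitB
  dsimp only
  set s := PySem.Chars.lstrip line with hs
  have hseq : line.dropWhile PySem.Chars.isspace = s := by rw [hs]; rfl
  rw [hseq]
  have hq : s.dropWhile (· == '#') = s.drop (pvRun s) := pvDropWhile_eq_drop_run s
  have hlen : s.length - (s.dropWhile (· == '#')).length = pvRun s := rfl
  rw [hlen, hq]
  have hget : (s.drop (pvRun s))[0]? = s[pvRun s]? := by
    rw [List.getElem?_drop]; norm_num
  have hdrop : (s.drop (pvRun s)).drop 1 = s.drop (pvRun s + 1) := by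
    rw [List.drop_drop]
  have hstrip : ∀ t : List Char,
      ((t.dropWhile PySem.Chars.isspace).reverse.dropWhile PySem.Chars.isspace).reverse =
        PySem.Chars.strip t := by
    intro t; simp [PySem.Chars.strip, PySem.Chars.lstrip, PySem.Chars.rstrip]
  rw [hget, hdrop, hstrip]
  by_cases h1 : PySem.Chars.startswith s ['#'] = true
  · rw [if_pos h1]
    by_cases hc : 1 ≤ pvRun s ∧ pvRun s ≤ 6 ∧ s[pvRun s]? = some ' '
    · rw [if_pos hc, pvLoop_eval s line hc.1 hc.2.1 hc.2.2]
      split_ifs <;> simp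
    · rw [if_neg hc, pvLoop_none]
      intro k h1k h6k hsw
      obtain ⟨rfl, hsp⟩ := (pvStartswith_iff k s).mp hsw
      exact hc ⟨h1k, h6k, hsp⟩
  · rw [if_neg h1, if_neg]
    rintro ⟨hk1, -, -⟩
    exact h1 ((pvRun_pos_iff s).mpr hk1)

-- reference shape of splitOn on the single-character separator '\n'
def pvAux : List Char → List Char → List (List Char)
  | cur, [] => [cur.reverse]
  | cur, c :: rest => if c = '\n' then cur.reverse :: pvAux [] rest else pvAux (c :: cur) rest

theorem pvGo_eq_aux (l cur : List Char) (acc : List (List Char)) (fuel : Nat)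
    (hf : l.length < fuel) :
    PySem.Chars.splitOn.go ['\n'] fuel l cur acc = acc.reverse ++ pvAux cur l := by
  induction l generalizing fuel cur acc with
  | nil =>
    cases fuel with
    | zero => omega
    | succ f => simp [PySem.Chars.splitOn.go, pvAux]
  | cons c rest ih =>
    cases fuel with
    | zero => omega
    | succ f =>
      by_cases hc : c = '\n'
      · subst hc
        rw [show PySem.Chars.splitOn.go ['\n'] (f + 1) ('\n' :: rest) cur acc
              = PySem.Chars.splitOn.go ['\n'] f rest [] (cur.reverse :: acc) from by
            simp [PySem.Chars.splitOn.go, List.isPrefixOf]]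
        rw [ih [] (cur.reverse :: acc) f (by simp at hf ⊢; omega)]
        simp [pvAux]
      · rw [show PySem.Chars.splitOn.go ['\n'] (f + 1) (c :: rest) cur acc
              = PySem.Chars.splitOn.go ['\n'] f rest (c :: cur) acc from by
            simp [PySem.Chars.splitOn.go, List.isPrefixOf, Ne.symm hc]]
        rw [ih (c :: cur) acc f (by simp at hf ⊢; omega)]
        simp [pvAux, hc]

theorem pvSplitOn_eq_aux (l : List Char) :
    PySem.Chars.splitOn l ['\n'] = pvAux [] l := by
  have := pvGo_eq_aux l [] [] (l.length + 1) (by omega)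
  simpa [PySem.Chars.splitOn] using this

theorem pvAux_eq (l cur : List Char) :
    pvAux cur l = (cur.reverse ++ l.takeWhile (· != '\n')) ::
      (match l.dropWhile (· != '\n') with
       | [] => []
       | _ :: t => pvAux [] t) := by
  induction l generalizing cur with
  | nil => simp [pvAux]
  | cons c rest ih =>
    by_cases hc : c = '\n'
    · subst hc; simp [pvAux, List.takeWhile, List.dropWhile]
    · have hb : (c != '\n') = true := by simp [hc]
      simp only [pvAux, if_neg hc, List.takeWhile, List.dropWhile, hb]
      rw [ih (c :: cur)]
      simp

theorem pvAux_ne_nil (cur l : List Char) : pvAux cur l ≠ [] := by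
  rw [pvAux_eq]; exact List.cons_ne_nil _ _

theorem pvJoin_cons (a : List Char) (l : List (List Char)) (h : l ≠ []) :
    PySem.Chars.join ['\n'] (a :: l) = a ++ '\n' :: PySem.Chars.join ['\n'] l := by
  cases l with
  | nil => exact absurd rfl h
  | cons b t => rw [PySem.Chars.join_cons_cons]; simp

-- B's streaming scanner equals join '\n' of A's per-line transform over the split
theorem pvGoB_eq (cs : List Char) :
    pvGoB cs = PySem.Chars.join ['\n'] ((pvAux [] cs).map pvLineA) := by
  induction hn : cs.length using Nat.strong_induction_on generalizing cs with
  | _ n ih =>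
    rw [pvGoB, pvAux_eq]
    cases hd : cs.dropWhile (· != '\n') with
    | nil =>
      simp only [List.reverse_nil, List.nil_append, List.map_cons, List.map_nil]
      rw [PySem.Chars.join_singleton, pvLine_eq]
    | cons c tail =>
      have hlt : tail.length < n := by
        have hle := List.length_dropWhile_le (p := fun c => c != '\n') (l := cs)
        rw [hd] at hle; simp at hle; omega
      dsimp only
      rw [ih tail.length (by omega) tail rfl]
      simp only [List.reverse_nil, List.nil_append, List.map_cons]
      rw [pvLine_eq, pvJoin_cons _ _ (by simp [pvAux_ne_nil])]

-- ===== VERDICT (by name: the statement is the Claim_ definition above) =====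
theorem normalize_markdown_py_spec : Claim_equal_normalize_markdown_py := by
  intro text _
  unfold Spec_normalize_markdown_py normalize_markdown_py normalize_markdown_py_alt
  rw [PySem.List.foldl_append_singleton_eq_map, pvSplitOn_eq_aux, pvGoB_eq,
    List.nil_append]
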